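-- pv_equiv track=rewrite | github.com/AndrewPetrouskiy/Python_homework | homeworks/homework_3/3_5.py | all_fibanacci
-- ===== SOURCE A (Python) =====
-- def all_fibanacci(n):
--     fib1 = 0
--     fib2 = 1
--     n = n - 2
--     temp = -1
--     fib = [fib2, fib1, fib2]
--     for i in range(0, n):
--         fib1, fib2 = fib2, (fib1 + fib2)
--         fib.append(fib2)
--         fib3 = fib2 * temp
--         temp *= -1
--         fib.insert(0, fib3)
--     return fib
-- ===== SOURCE B (Python) =====
-- def all_fibanacci(n):
--     # pass 1: the positive Fibonacci values F(2), F(3), ..., count of them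
--     count = max(0, n - 2)
--     fibs = []
--     a, b = 1, 1
--     for _ in range(count):
--         fibs.append(b)
--         a, b = b, a + b
--     # pass 2: assemble: signed mirror (reverse order), fixed center, forward tail
--     front = [(-1) ** (i + 1) * fibs[i] for i in range(count - 1, -1, -1)]
--     return front + [1, 0, 1] + fibs
-- ===== Notes on version B (the rewrite author's own statement) =====
-- stated objective: simpler
-- what changed: Replaces the single interleaved loop that mutates a running sign and inserts at the front of one list by two clean passes: generate the positive Fibonacci values once, then assemble front mirror (sign derived from the index), fixed center and tail by list concatenation.
import Mathlib
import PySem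

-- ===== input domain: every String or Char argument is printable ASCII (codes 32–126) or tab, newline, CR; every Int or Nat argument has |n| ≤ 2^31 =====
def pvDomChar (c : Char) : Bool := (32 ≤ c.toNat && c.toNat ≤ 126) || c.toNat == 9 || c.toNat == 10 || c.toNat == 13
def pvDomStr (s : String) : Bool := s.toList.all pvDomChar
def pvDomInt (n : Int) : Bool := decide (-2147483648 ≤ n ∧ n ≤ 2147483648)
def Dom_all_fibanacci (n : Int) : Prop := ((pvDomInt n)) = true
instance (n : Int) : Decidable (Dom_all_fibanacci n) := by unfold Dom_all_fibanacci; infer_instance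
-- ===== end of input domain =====

-- B replaces A's single sign-mutating loop with front insertion by two passes: generate the
-- Fibonacci values, then assemble signed-mirror front + fixed center + tail by concatenation (simpler).

-- ===== PORT A =====
-- literal transliteration: state (fib1, fib2, temp, fib); append = ++ [·], insert(0, ·) = cons
def all_fibanacci (n : Int) : List Int :=
  let r := (PySem.List.pyRange 0 (n - 2) 1).foldl
    (fun (st : Int × Int × Int × List Int) _ =>
      let f1 := st.1; let f2 := st.2.1; let temp := st.2.2.1; let fib := st.2.2.2
      let f1' := f2
      let f2' := f1 + f2
      let fib' := fib ++ [f2']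
      let f3 := f2' * temp
      (f1', f2', temp * -1, f3 :: fib'))
    (0, 1, -1, [1, 0, 1])
  r.2.2.2

-- ===== PORT B =====
-- Source B's generation loop: emit b, step (a, b) -> (b, a+b), `count` times
def pvFibsGen : Nat → Int → Int → List Int
  | 0, _, _ => []
  | k + 1, a, b => b :: pvFibsGen k b (a + b)

def all_fibanacci_alt (n : Int) : List Int :=
  let count : Nat := (n - 2).toNat          -- max(0, n - 2)
  let fibs := pvFibsGen count 1 1
  let front := (List.range count).reverse.map (fun i => (-1 : Int) ^ (i + 1) * fibs.getD i 0)
  front ++ [1, 0, 1] ++ fibs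

-- ===== PRECONDITION & SPEC =====
def Spec_all_fibanacci (n : Int) (out : List Int) : Prop := out = all_fibanacci_alt n
instance (n : Int) (out : List Int) : Decidable (Spec_all_fibanacci n out) := by unfold Spec_all_fibanacci; infer_instance

-- ===== CLAIM (what is proved, stated in full; the proofs are below) =====
def Claim_equal_all_fibanacci : Prop := ∀ (n : Int), Dom_all_fibanacci n → Spec_all_fibanacci n (all_fibanacci n)

-- ===== LEMMAS AND PROOFS =====

-- Fibonacci reference sequence: 0, 1, 1, 2, 3, 5, ...
def pvFibN : Nat → Int
  | 0 => 0
  | 1 => 1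
  | k + 2 => pvFibN k + pvFibN (k + 1)

def pvStep (st : Int × Int × Int × List Int) : Int × Int × Int × List Int :=
  let f1 := st.1; let f2 := st.2.1; let temp := st.2.2.1; let fib := st.2.2.2
  let f1' := f2
  let f2' := f1 + f2
  let fib' := fib ++ [f2']
  let f3 := f2' * temp
  (f1', f2', temp * -1, f3 :: fib')

theorem pvFoldl_const {α β : Type} (f : α → α) (l : List β) :
    ∀ (s : α), l.foldl (fun a _ => f a) s = f^[l.length] s := by
  induction l with
  | nil => intro s; simp
  | cons x xs ih =>
      intro s
      simp [List.foldl_cons, ih, Function.iterate_succ_apply]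

theorem pvFibsGen_eq (k : Nat) : ∀ (j : Nat),
    pvFibsGen k (pvFibN (j + 1)) (pvFibN (j + 2)) =
      (List.range k).map (fun i => pvFibN (i + j + 2)) := by
  induction k with
  | zero => intro j; simp [pvFibsGen]
  | succ k ih =>
      intro j
      show pvFibN (j + 2) :: pvFibsGen k (pvFibN (j + 2)) (pvFibN (j + 1) + pvFibN (j + 2)) = _
      rw [List.range_succ_eq_map, List.map_cons, List.map_map]
      have hb : pvFibN (j + 1) + pvFibN (j + 2) = pvFibN ((j + 1) + 2) := (pvFibN.eq_3 (j + 1)).symm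
      rw [hb, ih (j + 1)]
      congr 1
      · congr 1; omega
      · apply List.map_congr_left
        intro i _
        show pvFibN (i + (j + 1) + 2) = pvFibN (i + 1 + j + 2)
        congr 1
        omega

theorem pvFibsGen_top (k : Nat) :
    pvFibsGen k 1 1 = (List.range k).map (fun i => pvFibN (i + 2)) := by
  have := pvFibsGen_eq k 0
  simpa using this

theorem pvIter (k : Nat) :
    pvStep^[k] (0, 1, -1, [1, 0, 1]) =
      (pvFibN k, pvFibN (k + 1), -(-1 : Int) ^ k,
        ((List.range k).reverse.map (fun i => (-1 : Int) ^ (i + 1) * pvFibN (i + 2)))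
          ++ [1, 0, 1] ++ (List.range k).map (fun i => pvFibN (i + 2))) := by
  induction k with
  | zero => simp [pvFibN]
  | succ k ih =>
      rw [Function.iterate_succ_apply', ih]
      simp only [pvStep]
      refine Prod.ext rfl (Prod.ext ?_ (Prod.ext ?_ ?_))
      · show pvFibN k + pvFibN (k + 1) = pvFibN (k + 2)
        rw [pvFibN]
      · show (-(-1 : Int) ^ k) * -1 = -(-1 : Int) ^ (k + 1)
        ring
      · show ((pvFibN k + pvFibN (k + 1)) * (-(-1 : Int) ^ k)) ::
            (((List.range k).reverse.map (fun i => (-1 : Int) ^ (i + 1) * pvFibN (i + 2)))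
              ++ [1, 0, 1] ++ (List.range k).map (fun i => pvFibN (i + 2)) ++ [pvFibN k + pvFibN (k + 1)]) = _
        have hf : pvFibN k + pvFibN (k + 1) = pvFibN (k + 2) := (pvFibN.eq_3 k).symm
        rw [hf, List.range_succ]
        simp only [List.reverse_append, List.reverse_singleton, List.map_append, List.map_cons,
          List.map_nil, List.cons_append]
        congr 1
        · ring
        · simp

theorem pvGetD_fibs (k i : Nat) (hi : i < k) :
    ((List.range k).map (fun i => pvFibN (i + 2))).getD i 0 = pvFibN (i + 2) := by
  rw [List.getD_eq_getElem?_getD, List.getElem?_map]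
  simp [List.getElem?_range hi]

-- ===== VERDICT (by name: the statement is the Claim_ definition above) =====
theorem all_fibanacci_spec : Claim_equal_all_fibanacci := by
  intro n _
  show all_fibanacci n = all_fibanacci_alt n
  have hA : all_fibanacci n =
      ((PySem.List.pyRange 0 (n - 2) 1).foldl (fun st (_ : Int) => pvStep st)
        (0, 1, -1, [1, 0, 1])).2.2.2 := rfl
  have hlen : (PySem.List.pyRange 0 (n - 2) 1).length = (n - 2).toNat := by
    simp [PySem.List.length_pyRange_one]
  rw [hA, pvFoldl_const, hlen, pvIter]
  show ((List.range ((n - 2).toNat)).reverse.map (fun i => (-1 : Int) ^ (i + 1) * pvFibN (i + 2)))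
      ++ [1, 0, 1] ++ (List.range ((n - 2).toNat)).map (fun i => pvFibN (i + 2))
      = all_fibanacci_alt n
  unfold all_fibanacci_alt
  simp only [pvFibsGen_top]
  congr 1
  congr 1
  apply List.map_congr_left
  intro i hi
  rw [pvGetD_fibs _ i (List.mem_range.mp (List.mem_reverse.mp hi))]
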